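-- pv_equiv track=rewrite | github.com/robsca/dishoom-2 | Esteban-optim.py | process_rota
-- ===== SOURCE A (Python) =====
-- def process_rota(shifts):
--     '''
--     take all the shifts and create a hour by hour totals array for plotting
--     '''
--     rota = []
--     for shift in shifts:
--         hours = [i for i in range(shift[0], shift[1])]
--         rota.extend(hours)
--     unique_hours = list(set(rota))
--     unique_hours.sort()
--     # count the number of hours per day
--     rota = [rota.count(i) for i in unique_hours]
--     return rota
-- ===== SOURCE B (Python) =====
-- def process_rota(shifts):
--     '''
--     take all the shifts and create a hour by hour totals array for plotting
--     '''
--     # sweep line over a difference array: +1 at each shift start, -1 at its end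
--     delta = {}
--     for shift in shifts:
--         if shift[0] < shift[1]:
--             delta[shift[0]] = delta.get(shift[0], 0) + 1
--             delta[shift[1]] = delta.get(shift[1], 0) - 1
--     out = []
--     run = 0
--     prev = None
--     for p in sorted(delta):
--         if prev is not None and run > 0:
--             out.extend([run] * (p - prev))
--         run += delta[p]
--         prev = p
--     return out
-- ===== Notes on version B (the rewrite author's own statement) =====
-- stated objective: faster
-- what changed: Replaces A's explode-every-hour-then-count approach (flatten all ranges, dedup, sort, and one full list scan per unique hour) by a sweep line over a difference array: +1/-1 events at shift starts/ends, sorted event positions walked once with a running sum that is emitted per hour of each positively-covered segment.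
import Mathlib
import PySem

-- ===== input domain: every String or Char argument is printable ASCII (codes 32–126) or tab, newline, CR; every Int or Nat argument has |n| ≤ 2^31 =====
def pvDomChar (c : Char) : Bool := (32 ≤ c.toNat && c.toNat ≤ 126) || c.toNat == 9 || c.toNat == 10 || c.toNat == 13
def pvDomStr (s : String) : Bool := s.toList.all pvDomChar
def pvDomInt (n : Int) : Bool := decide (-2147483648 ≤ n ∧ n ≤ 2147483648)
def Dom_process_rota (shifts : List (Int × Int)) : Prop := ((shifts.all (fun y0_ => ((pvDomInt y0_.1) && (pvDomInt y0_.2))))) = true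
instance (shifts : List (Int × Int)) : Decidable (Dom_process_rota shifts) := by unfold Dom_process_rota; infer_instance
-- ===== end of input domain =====

-- B replaces A's explode-every-hour-then-count approach (flatten all ranges, dedup+sort, one full
-- scan per unique hour) by a sweep line over a difference array (+1/-1 events at shift bounds,
-- sorted positions walked once with a running coverage sum).

-- ===== PORT A =====
def process_rota (shifts : List (Int × Int)) : List Int :=
  let rota := shifts.foldl (fun acc shift => acc ++ PySem.List.pyRange shift.1 shift.2 1) []
  let unique_hours := PySem.List.sorted (PySem.Set.ofList rota) (fun x => x) false
  unique_hours.map (fun i => (PySem.List.count rota i : Int))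

-- ===== PORT B =====
-- the difference-array dict of Source B: delta[a] += 1, delta[b] -= 1 for each shift (a, b) with a < b
def pvDelta (shifts : List (Int × Int)) : PySem.Dict Int Int :=
  shifts.foldl (fun d shift =>
    if shift.1 < shift.2 then
      let d1 := d.insert shift.1 (d.getD shift.1 0 + 1)
      d1.insert shift.2 (d1.getD shift.2 0 - 1)
    else d) PySem.Dict.empty

-- Source B's loop body: emit the running sum once per hour of the segment [prev, p), then update it
-- (delta[p] for p a key of delta never raises in Source B, so getD _ 0 is exact here)
def pvSweepStep (delta : PySem.Dict Int Int) (st : List Int × Int × Option Int) (p : Int) :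
    List Int × Int × Option Int :=
  let out := match st.2.2 with
    | some prev => if st.2.1 > 0 then st.1 ++ List.replicate (p - prev).toNat st.2.1 else st.1
    | none => st.1
  (out, st.2.1 + delta.getD p 0, some p)

def process_rota_alt (shifts : List (Int × Int)) : List Int :=
  ((PySem.List.sorted (pvDelta shifts).keys (fun x => x) false).foldl
    (pvSweepStep (pvDelta shifts)) ([], 0, none)).1

-- ===== PRECONDITION & SPEC =====
def Spec_process_rota (shifts : List (Int × Int)) (out : List Int) : Prop := out = process_rota_alt shifts
instance (shifts : List (Int × Int)) (out : List Int) : Decidable (Spec_process_rota shifts out) := by unfold Spec_process_rota; infer_instance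

-- ===== CLAIM (what is proved, stated in full; the proofs are below) =====
def Claim_equal_process_rota : Prop := ∀ (shifts : List (Int × Int)), Dom_process_rota shifts → Spec_process_rota shifts (process_rota shifts)

-- ===== LEMMAS AND PROOFS =====

-- the flattened hour list A builds
def pvHours (shifts : List (Int × Int)) : List Int :=
  shifts.flatMap (fun shift => PySem.List.pyRange shift.1 shift.2 1)

-- coverage of hour h: how many shifts contain it
def pvCov (shifts : List (Int × Int)) (h : Int) : Nat :=
  shifts.countP (fun s => decide (s.1 ≤ h ∧ h < s.2))

-- reference form of B's sweep loop after its first event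
def pvSegs (delta : PySem.Dict Int Int) (run p0 : Int) : List Int → List Int
  | [] => []
  | k :: ks => (if run > 0 then List.replicate (k - p0).toNat run else []) ++
      pvSegs delta (run + delta.getD k 0) k ks

theorem count_pyRange (a b h : Int) :
    (PySem.List.pyRange a b 1).count h = if a ≤ h ∧ h < b then 1 else 0 := by
  by_cases hm : a ≤ h ∧ h < b
  · rw [if_pos hm]
    exact List.count_eq_one_of_mem (PySem.List.nodup_pyRange_one a b)
      ((PySem.List.mem_pyRange_one).2 hm)
  · simp [List.count_eq_zero, hm, PySem.List.mem_pyRange_one]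

theorem count_hours (shifts : List (Int × Int)) (h : Int) :
    (pvHours shifts).count h = pvCov shifts h := by
  induction shifts with
  | nil => rfl
  | cons s t ih =>
    simp only [pvHours, List.flatMap_cons, List.count_append, pvCov, List.countP_cons] at *
    rw [ih, count_pyRange]
    by_cases hc : s.1 ≤ h ∧ h < s.2
    · simp [hc]
      omega
    · simp [hc]

theorem delta_getD (shifts : List (Int × Int)) (d : PySem.Dict Int Int) (x : Int) :
    (shifts.foldl (fun d shift =>
      if shift.1 < shift.2 then
        let d1 := d.insert shift.1 (d.getD shift.1 0 + 1)
        d1.insert shift.2 (d1.getD shift.2 0 - 1)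
      else d) d).getD x 0
    = d.getD x 0
      + ((shifts.filter (fun s => decide (s.1 < s.2))).countP (fun s => decide (s.1 = x)) : Int)
      - ((shifts.filter (fun s => decide (s.1 < s.2))).countP (fun s => decide (s.2 = x)) : Int) := by
  induction shifts generalizing d with
  | nil => simp
  | cons s t ih =>
    simp only [List.foldl_cons, List.filter_cons]
    by_cases hlt : s.1 < s.2
    · simp only [hlt, decide_true, if_pos, List.countP_cons]
      rw [ih]
      have hne : s.1 ≠ s.2 := by omega
      have h2 : ((d.insert s.1 (d.getD s.1 0 + 1)).insert s.2
          ((d.insert s.1 (d.getD s.1 0 + 1)).getD s.2 0 - 1)).getD x 0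
          = d.getD x 0 + (if s.1 = x then 1 else 0) - (if s.2 = x then 1 else 0) := by
        simp only [PySem.Dict.getD_insert]
        split_ifs <;> (try subst_vars) <;> omega
      rw [h2]
      by_cases h1 : s.1 = x <;> by_cases h2 : s.2 = x <;> simp [h1, h2] <;> omega
    · simp only [hlt, decide_false, if_neg, Bool.false_eq_true, not_false_iff]
      exact ih d

theorem pvDelta_getD (shifts : List (Int × Int)) (x : Int) :
    (pvDelta shifts).getD x 0
    = ((shifts.filter (fun s => decide (s.1 < s.2))).countP (fun s => decide (s.1 = x)) : Int)
      - ((shifts.filter (fun s => decide (s.1 < s.2))).countP (fun s => decide (s.2 = x)) : Int) := by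
  unfold pvDelta
  rw [delta_getD, PySem.Dict.getD_empty]
  ring

theorem delta_keys_mem (shifts : List (Int × Int)) (d : PySem.Dict Int Int) (x : Int) :
    (x ∈ (shifts.foldl (fun d shift =>
      if shift.1 < shift.2 then
        let d1 := d.insert shift.1 (d.getD shift.1 0 + 1)
        d1.insert shift.2 (d1.getD shift.2 0 - 1)
      else d) d).keys)
    ↔ (x ∈ d.keys ∨ ∃ s ∈ shifts, s.1 < s.2 ∧ (x = s.1 ∨ x = s.2)) := by
  induction shifts generalizing d with
  | nil => simp
  | cons s t ih =>
    simp only [List.foldl_cons]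
    by_cases hlt : s.1 < s.2
    · simp only [hlt, if_pos]
      rw [ih]
      simp only [PySem.Dict.mem_keys_insert, List.mem_cons]
      aesop
    · simp only [hlt, if_neg, not_false_iff]
      rw [ih]
      constructor
      · rintro (h | h)
        · exact Or.inl h
        · obtain ⟨s', hs', h1, h2⟩ := h
          exact Or.inr ⟨s', List.mem_cons_of_mem _ hs', h1, h2⟩
      · rintro (h | ⟨s', hs', h1, h2⟩)
        · exact Or.inl h
        · rcases List.mem_cons.1 hs' with rfl | hs'
          · exact absurd h1 hlt
          · exact Or.inr ⟨s', hs', h1, h2⟩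

theorem pvDelta_keys_mem (shifts : List (Int × Int)) (x : Int) :
    x ∈ (pvDelta shifts).keys ↔ ∃ s ∈ shifts, s.1 < s.2 ∧ (x = s.1 ∨ x = s.2) := by
  unfold pvDelta
  rw [delta_keys_mem]
  simp [PySem.Dict.keys_empty]

theorem delta_keys_nodup (shifts : List (Int × Int)) (d : PySem.Dict Int Int)
    (hd : d.keys.Nodup) :
    (shifts.foldl (fun d shift =>
      if shift.1 < shift.2 then
        let d1 := d.insert shift.1 (d.getD shift.1 0 + 1)
        d1.insert shift.2 (d1.getD shift.2 0 - 1)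
      else d) d).keys.Nodup := by
  induction shifts generalizing d with
  | nil => exact hd
  | cons s t ih =>
    simp only [List.foldl_cons]
    by_cases hlt : s.1 < s.2
    · simp only [hlt, if_pos]
      exact ih _ (PySem.Dict.nodup_keys_insert _ _ _ (PySem.Dict.nodup_keys_insert _ _ _ hd))
    · simp only [hlt, if_neg, not_false_iff]
      exact ih _ hd

theorem pvDelta_keys_nodup (shifts : List (Int × Int)) : (pvDelta shifts).keys.Nodup := by
  unfold pvDelta
  exact delta_keys_nodup _ _ PySem.Dict.nodup_keys_empty

theorem pv_sum_map_sub (l : List Int) (f g : Int → Int) :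
    (l.map (fun x => f x - g x)).sum = (l.map f).sum - (l.map g).sum := by
  induction l with
  | nil => simp
  | cons x l ih => simp only [List.map_cons, List.sum_cons, ih]; ring

theorem sum_single (ks : List Int) (a h : Int) (hnd : ks.Nodup) (ha : a ∈ ks) :
    (ks.map (fun p => if p ≤ h then (if a = p then (1:Int) else 0) else 0)).sum
    = if a ≤ h then 1 else 0 := by
  induction ks with
  | nil => cases ha
  | cons k ks ih =>
    simp only [List.map_cons, List.sum_cons]
    rcases List.mem_cons.1 ha with rfl | ha'
    · have hz : (ks.map (fun p => if p ≤ h then (if a = p then (1:Int) else 0) else 0)).sum = 0 := by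
        apply List.sum_eq_zero
        intro x hx
        obtain ⟨p, hp, rfl⟩ := List.mem_map.1 hx
        have : a ≠ p := fun he => (List.nodup_cons.1 hnd).1 (he ▸ hp)
        simp [this]
      rw [hz]
      split_ifs with h1 h2 <;> simp_all
    · have hak : a ≠ k := fun he => (List.nodup_cons.1 hnd).1 (he ▸ ha')
      rw [ih (List.nodup_cons.1 hnd).2 ha']
      split_ifs with h1 h2 <;> simp_all

theorem sumproj (f : Int × Int → Int) (ks : List Int) (h : Int) (hnd : ks.Nodup) :
    ∀ (P : List (Int × Int)), (∀ s ∈ P, f s ∈ ks) →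
    (ks.map (fun p => if p ≤ h then ((P.countP (fun s => decide (f s = p)) : Int)) else 0)).sum
    = (P.countP (fun s => decide (f s ≤ h)) : Int) := by
  intro P
  induction P with
  | nil => intro _; simp
  | cons s P ih =>
    intro hall
    have hmem : f s ∈ ks := hall s (List.mem_cons_self ..)
    have hrest : ∀ t ∈ P, f t ∈ ks := fun t ht => hall t (List.mem_cons_of_mem _ ht)
    simp only [List.countP_cons]
    push_cast
    have hmapeq : ks.map (fun p => if p ≤ h then ((P.countP (fun t => decide (f t = p)) : Int)
          + if decide (f s = p) = true then (1:Int) else 0) else 0)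
        = ks.map (fun p => (if p ≤ h then ((P.countP (fun t => decide (f t = p)) : Int)) else 0)
          + (if p ≤ h then (if f s = p then (1:Int) else 0) else 0)) := by
      apply List.map_congr_left
      intro p _
      by_cases h1 : p ≤ h <;> by_cases h2 : f s = p <;> simp [h1, h2]
    rw [hmapeq, List.sum_map_add, ih hrest, sum_single ks (f s) h hnd hmem]
    by_cases h3 : f s ≤ h <;> simp [h3]

theorem count_split (P : List (Int × Int)) (h : Int) (hP : ∀ s ∈ P, s.1 < s.2) :
    P.countP (fun s => decide (s.1 ≤ h))
    = P.countP (fun s => decide (s.1 ≤ h ∧ h < s.2)) + P.countP (fun s => decide (s.2 ≤ h)) := by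
  induction P with
  | nil => rfl
  | cons s P ih =>
    have hs := hP s (List.mem_cons_self ..)
    have hrest := fun t ht => hP t (List.mem_cons_of_mem _ ht)
    simp only [List.countP_cons, ih hrest]
    split_ifs <;> simp_all <;> omega

theorem cov_sum (shifts : List (Int × Int)) (ks : List Int) (h : Int) (hnd : ks.Nodup)
    (hall : ∀ s ∈ shifts, s.1 < s.2 → s.1 ∈ ks ∧ s.2 ∈ ks) :
    (ks.map (fun p => if p ≤ h then (pvDelta shifts).getD p 0 else 0)).sum
    = (pvCov shifts h : Int) := by
  set P := shifts.filter (fun s => decide (s.1 < s.2)) with hPdef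
  have hPlt : ∀ s ∈ P, s.1 < s.2 := by
    intro s hs
    have := List.mem_filter.1 hs
    simpa using this.2
  have hP1 : ∀ s ∈ P, s.1 ∈ ks := fun s hs =>
    (hall s (List.mem_filter.1 hs).1 (hPlt s hs)).1
  have hP2 : ∀ s ∈ P, s.2 ∈ ks := fun s hs =>
    (hall s (List.mem_filter.1 hs).1 (hPlt s hs)).2
  have hmapeq : ks.map (fun p => if p ≤ h then (pvDelta shifts).getD p 0 else 0)
      = ks.map (fun p => (if p ≤ h then ((P.countP (fun s => decide (s.1 = p)) : Int)) else 0)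
        - (if p ≤ h then ((P.countP (fun s => decide (s.2 = p)) : Int)) else 0)) := by
    apply List.map_congr_left
    intro p _
    rw [pvDelta_getD]
    simp only [← hPdef]
    split_ifs <;> ring
  rw [hmapeq, pv_sum_map_sub, sumproj (fun s => s.1) ks h hnd P hP1,
    sumproj (fun s => s.2) ks h hnd P hP2]
  have hcov : pvCov shifts h = P.countP (fun s => decide (s.1 ≤ h ∧ h < s.2)) := by
    rw [pvCov, hPdef, List.countP_filter]
    apply List.countP_congr
    intro s _
    constructor
    · intro hx
      simp_all
      omega
    · intro hx
      simp_all
  rw [hcov, count_split P h hPlt]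
  push_cast
  ring

theorem fold_go (delta : PySem.Dict Int Int) (ks : List Int) :
    ∀ (out : List Int) (run p0 : Int),
    (ks.foldl (pvSweepStep delta) (out, run, some p0)).1 = out ++ pvSegs delta run p0 ks := by
  induction ks with
  | nil => intro out run p0; simp [pvSegs]
  | cons k ks ih =>
    intro out run p0
    simp only [List.foldl_cons, pvSweepStep, pvSegs]
    by_cases hr : run > 0
    · simp only [hr, if_pos]
      rw [ih]
      simp [List.append_assoc]
    · simp only [hr, if_neg, not_false_iff]
      rw [ih]
      simp

theorem pv_sum_if_zero (l : List Int) (h : Int) (f : Int → Int) (hall : ∀ x ∈ l, h < x) :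
    (l.map (fun k => if k ≤ h then f k else 0)).sum = 0 := by
  apply List.sum_eq_zero
  intro x hx
  obtain ⟨k, hk, rfl⟩ := List.mem_map.1 hx
  have := hall k hk
  simp [show ¬ k ≤ h by omega]

theorem pv_mem_le_last (k0 : Int) (rest : List Int)
    (hs : (k0 :: rest).Pairwise (· < ·)) : ∀ x ∈ k0 :: rest, x ≤ rest.getLastD k0 := by
  induction rest generalizing k0 with
  | nil => intro x hx; simp_all
  | cons k1 rest ih =>
    intro x hx
    have hs' : (k1 :: rest).Pairwise (· < ·) := hs.tail
    rw [List.getLastD_cons]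
    rcases List.mem_cons.1 hx with rfl | hx'
    · have h01 : x < k1 := (List.pairwise_cons.1 hs).1 k1 (List.mem_cons_self ..)
      have := ih k1 hs' k1 (List.mem_cons_self ..)
      exact le_trans (le_of_lt h01) this
    · exact ih k1 hs' x hx'

theorem pv_head_le_mem (k0 : Int) (rest : List Int)
    (hs : (k0 :: rest).Pairwise (· < ·)) : ∀ x ∈ k0 :: rest, k0 ≤ x := by
  intro x hx
  rcases List.mem_cons.1 hx with rfl | hx'
  · exact le_refl x
  · exact le_of_lt ((List.pairwise_cons.1 hs).1 x hx')

theorem segs_spec (delta : PySem.Dict Int Int) (C : Int → Int) :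
    ∀ (ks : List Int) (p0 run : Int),
    (p0 :: ks).Pairwise (· < ·) →
    (∀ h, p0 ≤ h → C h = run + (ks.map (fun k => if k ≤ h then delta.getD k 0 else 0)).sum) →
    pvSegs delta run p0 ks
      = ((PySem.List.pyRange p0 (ks.getLastD p0) 1).filter (fun h => decide (0 < C h))).map C := by
  intro ks
  induction ks with
  | nil =>
    intro p0 run _ _
    simp [pvSegs, PySem.List.pyRange_one_eq_nil (le_refl p0)]
  | cons k ks ih =>
    intro p0 run hsort hC
    have hp0k : p0 < k := (List.pairwise_cons.1 hsort).1 k (List.mem_cons_self ..)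
    have hsort' : (k :: ks).Pairwise (· < ·) := hsort.tail
    have hklast : k ≤ ks.getLastD k := pv_mem_le_last k ks hsort' k (List.mem_cons_self ..)
    have hconst : ∀ h, p0 ≤ h → h < k → C h = run := by
      intro h h1 h2
      rw [hC h h1, List.map_cons]
      simp only [List.sum_cons]
      rw [pv_sum_if_zero ks h _ (fun x hx => lt_trans h2 ((List.pairwise_cons.1 hsort').1 x hx)),
        if_neg (by omega)]
      ring
    have hCk : ∀ h, k ≤ h →
        C h = (run + delta.getD k 0) + (ks.map (fun k' => if k' ≤ h then delta.getD k' 0 else 0)).sum := by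
      intro h hkh
      rw [hC h (le_trans (le_of_lt hp0k) hkh), List.map_cons]
      simp only [List.sum_cons, if_pos hkh]
      ring
    rw [List.getLastD_cons,
      PySem.List.pyRange_one_append p0 k (ks.getLastD k) (le_of_lt hp0k) hklast,
      List.filter_append, List.map_append]
    rw [pvSegs, ih k (run + delta.getD k 0) hsort' hCk]
    congr 1
    by_cases hr : run > 0
    · rw [if_pos hr]
      have hfil : (PySem.List.pyRange p0 k 1).filter (fun h => decide (0 < C h))
          = PySem.List.pyRange p0 k 1 := by
        apply List.filter_eq_self.2
        intro h hh
        have := PySem.List.mem_pyRange_one.1 hh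
        rw [hconst h this.1 this.2]
        simpa using hr
      rw [hfil]
      have hmap : (PySem.List.pyRange p0 k 1).map C
          = (PySem.List.pyRange p0 k 1).map (fun _ => run) := by
        apply List.map_congr_left
        intro h hh
        have := PySem.List.mem_pyRange_one.1 hh
        exact hconst h this.1 this.2
      rw [hmap, List.map_const', PySem.List.length_pyRange_one]
    · rw [if_neg hr]
      symm
      rw [List.map_eq_nil_iff, List.filter_eq_nil_iff]
      intro h hh
      have := PySem.List.mem_pyRange_one.1 hh
      rw [hconst h this.1 this.2]
      simpa using hr

theorem pv_A_char (shifts : List (Int × Int)) :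
    process_rota shifts
    = (PySem.List.sorted (PySem.Set.ofList (pvHours shifts)) (fun x => x) false).map
        (fun h => (pvCov shifts h : Int)) := by
  unfold process_rota
  rw [PySem.List.foldl_append_eq_flatMap, List.nil_append]
  have : shifts.flatMap (fun shift => PySem.List.pyRange shift.1 shift.2 1) = pvHours shifts := rfl
  rw [this]
  apply List.map_congr_left
  intro h _
  rw [PySem.List.count_eq, count_hours]

theorem pv_mem_hours (shifts : List (Int × Int)) (x : Int) :
    x ∈ pvHours shifts ↔ 0 < pvCov shifts x := by
  rw [← count_hours, List.count_pos_iff]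

theorem pv_main (shifts : List (Int × Int)) :
    process_rota shifts = process_rota_alt shifts := by
  rw [pv_A_char]
  unfold process_rota_alt
  cases hks : PySem.List.sorted (pvDelta shifts).keys (fun x => x) false with
  | nil =>
    have hkeys : (pvDelta shifts).keys = [] := (PySem.List.sorted_eq_nil_iff _ _ _).1 hks
    have hnone : ∀ s ∈ shifts, ¬ s.1 < s.2 := by
      intro s hs hlt
      have hmem : s.1 ∈ (pvDelta shifts).keys :=
        (pvDelta_keys_mem shifts s.1).2 ⟨s, hs, hlt, Or.inl rfl⟩
      rw [hkeys] at hmem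
      cases hmem
    have hhours : pvHours shifts = [] := by
      rw [pvHours, List.flatMap_eq_nil_iff]
      intro s hs
      exact PySem.List.pyRange_one_eq_nil (by have := hnone s hs; omega)
    rw [hhours]
    simp [PySem.List.sorted_eq_nil_iff]
  | cons k0 rest =>
    have hperm : List.Perm (k0 :: rest) (pvDelta shifts).keys :=
      hks ▸ PySem.List.sorted_perm (pvDelta shifts).keys (fun x => x) false
    have hnodup : (k0 :: rest).Nodup := hperm.nodup_iff.2 (pvDelta_keys_nodup shifts)
    have hle : (k0 :: rest).Pairwise (fun a b => a ≤ b) := by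
      have := PySem.List.sorted_pairwise (pvDelta shifts).keys (fun x => x)
      rw [hks] at this
      exact this
    have hlt : (k0 :: rest).Pairwise (· < ·) :=
      (hle.and hnodup).imp (fun h => lt_of_le_of_ne h.1 h.2)
    have hmemks : ∀ x, x ∈ (k0 :: rest) ↔ ∃ s ∈ shifts, s.1 < s.2 ∧ (x = s.1 ∨ x = s.2) :=
      fun x => hperm.mem_iff.trans (pvDelta_keys_mem shifts x)
    have hcovsum : ∀ h, ((k0 :: rest).map
          (fun p => if p ≤ h then (pvDelta shifts).getD p 0 else 0)).sum
        = (pvCov shifts h : Int) := by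
      intro h
      apply cov_sum shifts (k0 :: rest) h hnodup
      intro s hs hslt
      constructor
      · exact (hmemks s.1).2 ⟨s, hs, hslt, Or.inl rfl⟩
      · exact (hmemks s.2).2 ⟨s, hs, hslt, Or.inr rfl⟩
    have hB : ((k0 :: rest).foldl (pvSweepStep (pvDelta shifts)) ([], 0, none)).1
        = pvSegs (pvDelta shifts) (0 + (pvDelta shifts).getD k0 0) k0 rest := by
      rw [List.foldl_cons,
        show pvSweepStep (pvDelta shifts) ([], 0, none) k0
          = (([] : List Int), 0 + (pvDelta shifts).getD k0 0, some k0) from rfl,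
        fold_go, List.nil_append]
    rw [hB, segs_spec (pvDelta shifts) (fun h => (pvCov shifts h : Int)) rest k0
      (0 + (pvDelta shifts).getD k0 0) hlt ?hrun]
    case hrun =>
      intro h hk0h
      have := hcovsum h
      rw [List.map_cons, List.sum_cons, if_pos hk0h] at this
      beta_reduce
      omega
    -- both sides are 'map cov' over strictly sorted lists of exactly the covered hours
    congr 1
    apply PySem.List.eq_of_perm_of_pairwise_le_of_injective (fun x : Int => x)
      (fun a b hab => hab)
    · have hnod1 : (PySem.List.sorted (PySem.Set.ofList (pvHours shifts)) (fun x => x) false).Nodup :=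
        (PySem.List.sorted_perm _ _ _).nodup_iff.2 (PySem.Set.nodup_ofList _)
      have hpwr : ((PySem.List.pyRange k0 (rest.getLastD k0) 1).filter
          (fun h => decide (0 < (pvCov shifts h : Int)))).Pairwise (· < ·) :=
        (PySem.List.pairwise_lt_pyRange_one k0 (rest.getLastD k0)).filter _
      have hnod2 := hpwr.imp (fun {a b} (hab : a < b) => ne_of_lt hab)
      rw [List.perm_ext_iff_of_nodup hnod1 hnod2]
      intro x
      have hm1 : x ∈ PySem.List.sorted (PySem.Set.ofList (pvHours shifts)) (fun x => x) false
          ↔ 0 < pvCov shifts x := by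
        rw [(PySem.List.sorted_perm _ _ _).mem_iff, PySem.Set.mem_ofList, pv_mem_hours]
      rw [hm1, List.mem_filter]
      constructor
      · intro hpos
        obtain ⟨s, hs, hps⟩ := List.countP_pos_iff.1 hpos
        have hbx := of_decide_eq_true hps
        have hslt : s.1 < s.2 := by omega
        have hk1 : s.1 ∈ (k0 :: rest) := (hmemks s.1).2 ⟨s, hs, hslt, Or.inl rfl⟩
        have hk2 : s.2 ∈ (k0 :: rest) := (hmemks s.2).2 ⟨s, hs, hslt, Or.inr rfl⟩
        have hlo : k0 ≤ s.1 := pv_head_le_mem k0 rest hlt s.1 hk1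
        have hhi : s.2 ≤ rest.getLastD k0 := pv_mem_le_last k0 rest hlt s.2 hk2
        refine ⟨PySem.List.mem_pyRange_one.2 ⟨by omega, by omega⟩, ?_⟩
        simpa using hpos
      · intro ⟨_, hpos⟩
        simpa using hpos
    · have := PySem.List.sorted_pairwise (PySem.Set.ofList (pvHours shifts)) (fun x : Int => x)
      exact this
    · exact ((PySem.List.pairwise_lt_pyRange_one k0 (rest.getLastD k0)).filter _).imp
        (fun {a b} hab => le_of_lt hab)

-- ===== VERDICT (by name: the statement is the Claim_ definition above) =====
theorem process_rota_spec : Claim_equal_process_rota := by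
  intro shifts _
  unfold Spec_process_rota
  exact pv_main shifts
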